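-- pv_equiv track=rewrite | github.com/hjc2/rsaAlgo | ascii.py | encodeAscii
-- ===== SOURCE A (Python) =====
-- def encodeAscii(m):
--     text = ''
--     for x in m:
--         organ = str(ord(x))
--         if(len(organ) == 1):
--             organ = "90" + organ
--         if(len(organ) == 2):
--             organ = "9" + organ
--         text = text + organ
--     return(text)
-- ===== SOURCE B (Python) =====
-- def encodeAscii(m):
--     # Digit arithmetic instead of decimal-string padding: each char's code o is
--     # mapped to the number v = o + 900 if o < 100 else o (always 3 digits for
--     # codes < 1000), and the three digit characters are extracted with // and %.
--     out = []
--     for x in m: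
--         v = ord(x)
--         if v < 100:
--             v += 900
--         out.append(chr(48 + v // 100))
--         out.append(chr(48 + v // 10 % 10))
--         out.append(chr(48 + v % 10))
--     return ''.join(out)
-- ===== Notes on version B (the rewrite author's own statement) =====
-- stated objective: alternative
-- what changed: B never converts codes to decimal strings or measures lengths: it offsets codes below 100 by 900 and extracts the three digit characters arithmetically with // and %, collecting them in a list joined once.
import Mathlib
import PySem

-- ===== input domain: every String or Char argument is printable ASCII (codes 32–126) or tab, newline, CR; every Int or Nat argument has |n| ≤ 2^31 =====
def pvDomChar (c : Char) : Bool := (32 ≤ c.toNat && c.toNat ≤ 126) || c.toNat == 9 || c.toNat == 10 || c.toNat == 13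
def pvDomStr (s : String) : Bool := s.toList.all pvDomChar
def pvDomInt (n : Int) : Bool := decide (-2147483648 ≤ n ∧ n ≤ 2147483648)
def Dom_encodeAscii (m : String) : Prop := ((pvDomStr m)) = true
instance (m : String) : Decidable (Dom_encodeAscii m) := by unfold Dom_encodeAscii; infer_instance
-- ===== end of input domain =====

-- B replaces A's decimal-string length checks and quadratic concatenation by pure digit
-- arithmetic (offset codes < 100 by 900, extract the three digits with // and %).

-- ===== PORT A =====
-- for x in m: organ = str(ord(x)); pad by length checks; text = text + organ
def encodeAscii (m : String) : String :=
  String.ofList (m.toList.foldl (fun text x =>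
    let organ := PySem.Int.toChars (x.toNat : Int)
    let organ := if PySem.Chars.len organ = 1 then ('9' :: '0' :: organ) else organ
    let organ := if PySem.Chars.len organ = 2 then ('9' :: organ) else organ
    text ++ organ) [])

-- ===== PORT B =====
-- out = []; per char: v = ord(x) (+900 if < 100); append chr(48+v//100), chr(48+v//10%10), chr(48+v%10); ''.join(out)
def encodeAscii_alt (m : String) : String :=
  String.ofList (m.toList.foldl (fun out x =>
    let v := x.toNat
    let v := if v < 100 then v + 900 else v
    out ++ [Char.ofNat (48 + v / 100), Char.ofNat (48 + v / 10 % 10), Char.ofNat (48 + v % 10)]) [])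

-- ===== PRECONDITION & SPEC =====
def Spec_encodeAscii (m : String) (out : String) : Prop := out = encodeAscii_alt m
instance (m : String) (out : String) : Decidable (Spec_encodeAscii m out) := by unfold Spec_encodeAscii; infer_instance

-- ===== CLAIM (what is proved, stated in full; the proofs are below) =====
def Claim_equal_encodeAscii : Prop := ∀ (m : String), Dom_encodeAscii m → Spec_encodeAscii m (encodeAscii m)

-- ===== LEMMAS AND PROOFS =====

-- A's per-char piece
def pvPieceA (x : Char) : List Char :=
  let organ := PySem.Int.toChars (x.toNat : Int)
  let organ := if PySem.Chars.len organ = 1 then ('9' :: '0' :: organ) else organ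
  if PySem.Chars.len organ = 2 then ('9' :: organ) else organ

-- B's per-char piece
def pvPieceB (x : Char) : List Char :=
  let v := x.toNat
  let v := if v < 100 then v + 900 else v
  [Char.ofNat (48 + v / 100), Char.ofNat (48 + v / 10 % 10), Char.ofNat (48 + v % 10)]

-- the pieces agree for every code ≤ 126 (checked exhaustively)
theorem pvPiece_eq_of_le (x : Char) (h : x.toNat ≤ 126) : pvPieceA x = pvPieceB x := by
  have hb : ∀ n : Nat, n < 127 →
      (let organ := PySem.Int.toChars (n : Int)
       let organ := if PySem.Chars.len organ = 1 then ('9' :: '0' :: organ) else organ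
       if PySem.Chars.len organ = 2 then ('9' :: organ) else organ) =
      (let v := if n < 100 then n + 900 else n
       [Char.ofNat (48 + v / 100), Char.ofNat (48 + v / 10 % 10), Char.ofNat (48 + v % 10)]) := by
    decide
  simpa [pvPieceA, pvPieceB] using hb x.toNat (by omega)

theorem encodeAscii_spec : Claim_equal_encodeAscii := by
  intro m hd
  unfold Spec_encodeAscii encodeAscii encodeAscii_alt
  have hdom : ∀ x ∈ m.toList, x.toNat ≤ 126 := by
    intro x hx
    have := List.all_eq_true.mp hd x hx
    simp [pvDomChar] at this
    omega
  have hA : m.toList.foldl (fun text x => text ++ pvPieceA x) [] = m.toList.flatMap pvPieceA := by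
    simpa using PySem.List.foldl_append_eq_flatMap (l := m.toList) pvPieceA ([] : List Char)
  have hB : m.toList.foldl (fun out x => out ++ pvPieceB x) [] = m.toList.flatMap pvPieceB := by
    simpa using PySem.List.foldl_append_eq_flatMap (l := m.toList) pvPieceB ([] : List Char)
  have hsame : m.toList.flatMap pvPieceA = m.toList.flatMap pvPieceB := by
    simp only [List.flatMap_def]
    congr 1
    exact List.map_congr_left fun x hx => pvPiece_eq_of_le x (hdom x hx)
  show String.ofList (m.toList.foldl (fun text x => text ++ pvPieceA x) []) =
       String.ofList (m.toList.foldl (fun out x => out ++ pvPieceB x) [])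
  rw [hA, hB, hsame]
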